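-- pv_equiv track=rewrite | github.com/Klaudit/honbot-django | honbot-api/honbotproject/hb/management/commands/item_loader.py | hon2html
-- ===== SOURCE A (Python) =====
-- def isDigit(c):
--     return c in ['0','1','2','3','4','5','6','7','8','9']
--
-- def hon2html(msg):
--     if msg is not None:
--         hon_colors = ["00","1C","38","54","70","8C","A8","C4","E0","FF"]
--         msg = msg.replace('\\n','<br>')
--         parts = msg.split('^')
--         base = '<span>'
--         #msg = '<span style="color: white;">' + parts[0]
--         msg = base + parts[0]
--         for part in parts[1:]:
--             if len(part) < 1:
--                 msg += '^'
--             elif part[0] == 'w' or part[0] == 'W':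
--                 msg += '</span><span style="color: white;">' + part[1:]
--             elif part[0] == 'r' or part[0] == 'R':
--                 msg += '</span><span style="color: #FF4C4C;">' + part[1:]
--             elif part[0] == 'y' or part[0] == 'Y':
--                 msg += '</span><span style="color: #FFFF19;">' + part[1:]
--             elif part[0] == 'g' or part[0] == 'G':
--                 msg += '</span><span style="color: #008000;">' + part[1:]
--             elif part[0] == 'k' or part[0] == 'K':
--                 msg += '</span><span style="color: #000000;">' + part[1:]
--             elif part[0] == 'c' or part[0] == 'C':
--                 msg += '</span><span style="color: #00FFFF;">' + part[1:]
--             elif part[0] == 'b' or part[0] == 'B':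
--                 msg += '</span><span style="color: #4C4CFF;">' + part[1:]
--             elif part[0] == 't' or part[0] == 'T':
--                 msg += '</span><span style="color: teal;">' + part[1:]
--             elif part[0] == 'o' or part[0] == 'O':
--                 msg += '</span><span style="color: orange;">' + part[1:]
--             elif part[0] == 'm' or part[0] == 'M':
--                 msg += '</span><span style="color: #FF00FF;">' + part[1:]
--             elif len(part) >= 3 and isDigit(part[0]) and isDigit(part[1]) and isDigit(part[2]):
--                 msg += '</span><span style="color: #%s%s%s;">' % (hon_colors[int(part[0])],hon_colors[int(part[1])],hon_colors[int(part[2])]) + part[3:]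
--             elif part[0] == '*':
--                 msg += '</span>' + base + part[1:]
--             elif part[0] in [';',':']:
--                 msg += part[1:]
--             else:
--                 msg += part
--         return msg + '</span>'
-- ===== SOURCE B (Python) =====
-- # Single-pass index scanner over the raw string: no split('^'), no per-part slices;
-- # carets are handled in place and text is copied char by char into an output list.
-- _COLORS = {'w': 'white', 'r': '#FF4C4C', 'y': '#FFFF19', 'g': '#008000',
--            'k': '#000000', 'c': '#00FFFF', 'b': '#4C4CFF', 't': 'teal',
--            'o': 'orange', 'm': '#FF00FF'}
-- _COLORS.update({k.upper(): v for k, v in list(_COLORS.items())})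
-- _HEX = ["00", "1C", "38", "54", "70", "8C", "A8", "C4", "E0", "FF"]
-- _DIGITS = '0123456789'
--
-- def hon2html(msg):
--     if msg is None:
--         return None
--     s = msg.replace('\\n', '<br>')
--     n = len(s)
--     out = []
--     i = 0
--     # verbatim text before the first caret
--     while i < n and s[i] != '^':
--         out.append(s[i]); i += 1
--     while i < n:            # s[i] == '^'
--         i += 1              # consume the caret
--         if i == n or s[i] == '^':
--             out.append('^')
--             continue
--         h = s[i]
--         col = _COLORS.get(h)
--         if col is not None:
--             out.append('</span><span style="color: %s;">' % col)
--             i += 1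
--         elif h in _DIGITS and i + 2 < n and s[i+1] in _DIGITS and s[i+2] in _DIGITS:
--             out.append('</span><span style="color: #%s%s%s;">'
--                        % (_HEX[int(h)], _HEX[int(s[i+1])], _HEX[int(s[i+2])]))
--             i += 3
--         elif h == '*':
--             out.append('</span><span>')
--             i += 1
--         elif h in ';:':
--             i += 1
--         # default: leave h where it is; the copy loop below emits it
--         while i < n and s[i] != '^':
--             out.append(s[i]); i += 1
--     return '<span>' + ''.join(out) + '</span>'
-- ===== Notes on version B (the rewrite author's own statement) =====
-- stated objective: alternative
-- what changed: Replaces split('^') plus a per-part elif chain and string += with a single-pass index scanner over the raw string that consumes carets in place (and the three digit codes directly) and joins an output list once.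
import Mathlib
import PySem

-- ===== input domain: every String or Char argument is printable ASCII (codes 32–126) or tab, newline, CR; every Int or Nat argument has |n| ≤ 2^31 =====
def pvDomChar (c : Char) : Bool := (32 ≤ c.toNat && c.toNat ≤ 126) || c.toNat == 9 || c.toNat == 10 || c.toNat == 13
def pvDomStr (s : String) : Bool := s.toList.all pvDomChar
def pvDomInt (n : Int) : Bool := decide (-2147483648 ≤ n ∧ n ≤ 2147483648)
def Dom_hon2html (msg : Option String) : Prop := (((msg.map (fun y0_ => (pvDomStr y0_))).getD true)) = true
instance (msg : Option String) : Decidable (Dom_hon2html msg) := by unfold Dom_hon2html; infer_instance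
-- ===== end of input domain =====

-- B replaces A's split('^') + per-part elif chain + string accumulation with a
-- single-pass index scanner over the raw string (objective: alternative; same cost).

-- ===== PORT A =====
def honColorsA : List (List Char) :=
  ["00".toList, "1C".toList, "38".toList, "54".toList, "70".toList,
   "8C".toList, "A8".toList, "C4".toList, "E0".toList, "FF".toList]

def isDigitA (c : Char) : Bool := (['0','1','2','3','4','5','6','7','8','9'] : List Char).contains c

-- int(part[i]) is only evaluated under the isDigitA guard; for a digit char it is code − 48
def digitValA (c : Char) : Nat := c.toNat - 48

-- the residual branches of A's elif chain ('*', ';'/':', default)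
def tailA (c : Char) (rest : List Char) : List Char :=
  if c = '*' then "</span>".toList ++ "<span>".toList ++ rest
  else if ([';', ':'] : List Char).contains c then rest
  else c :: rest

-- one iteration of A's loop: the string appended to msg for this part
def pieceA (part : List Char) : List Char :=
  match part with
  | [] => ['^']
  | c :: rest =>
    if c = 'w' || c = 'W' then "</span><span style=\"color: white;\">".toList ++ rest
    else if c = 'r' || c = 'R' then "</span><span style=\"color: #FF4C4C;\">".toList ++ rest
    else if c = 'y' || c = 'Y' then "</span><span style=\"color: #FFFF19;\">".toList ++ rest
    else if c = 'g' || c = 'G' then "</span><span style=\"color: #008000;\">".toList ++ rest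
    else if c = 'k' || c = 'K' then "</span><span style=\"color: #000000;\">".toList ++ rest
    else if c = 'c' || c = 'C' then "</span><span style=\"color: #00FFFF;\">".toList ++ rest
    else if c = 'b' || c = 'B' then "</span><span style=\"color: #4C4CFF;\">".toList ++ rest
    else if c = 't' || c = 'T' then "</span><span style=\"color: teal;\">".toList ++ rest
    else if c = 'o' || c = 'O' then "</span><span style=\"color: orange;\">".toList ++ rest
    else if c = 'm' || c = 'M' then "</span><span style=\"color: #FF00FF;\">".toList ++ rest
    else
      -- len(part) >= 3 and isDigit(part[0..2])
      match rest with
      | c1 :: c2 :: rest2 =>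
        if isDigitA c && isDigitA c1 && isDigitA c2 then
          "</span><span style=\"color: #".toList ++ honColorsA.getD (digitValA c) []
            ++ honColorsA.getD (digitValA c1) [] ++ honColorsA.getD (digitValA c2) []
            ++ ";\">".toList ++ rest2
        else tailA c (c1 :: c2 :: rest2)
      | _ => tailA c rest

def hon2html (msg : Option String) : Option String :=
  match msg with
  | none => none
  | some s =>
    let m := PySem.Chars.replace s.toList "\\n".toList "<br>".toList
    let parts := PySem.Chars.splitOn m "^".toList
    let msg1 := "<span>".toList ++ parts.headD []   -- split never returns []; parts[0]
    let msg2 := (parts.drop 1).foldl (fun acc part => acc ++ pieceA part) msg1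
    some (String.ofList (msg2 ++ "</span>".toList))

-- ===== PORT B =====
-- _COLORS with both cases written out (Source B builds the upper-case half with an update)
def colorTableB : List (Char × List Char) :=
  [('w', "white".toList), ('r', "#FF4C4C".toList), ('y', "#FFFF19".toList),
   ('g', "#008000".toList), ('k', "#000000".toList), ('c', "#00FFFF".toList),
   ('b', "#4C4CFF".toList), ('t', "teal".toList), ('o', "orange".toList),
   ('m', "#FF00FF".toList),
   ('W', "white".toList), ('R', "#FF4C4C".toList), ('Y', "#FFFF19".toList),
   ('G', "#008000".toList), ('K', "#000000".toList), ('C', "#00FFFF".toList),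
   ('B', "#4C4CFF".toList), ('T', "teal".toList), ('O', "orange".toList),
   ('M', "#FF00FF".toList)]

def hexB : List (List Char) :=
  ["00".toList, "1C".toList, "38".toList, "54".toList, "70".toList,
   "8C".toList, "A8".toList, "C4".toList, "E0".toList, "FF".toList]

-- _DIGITS = '0123456789'; `h in _DIGITS` is membership
def digitsB : List Char := ['0','1','2','3','4','5','6','7','8','9']

mutual
-- Source B's copy loops: `while i < n and s[i] != '^': out.append(s[i])`, then the caret handler
def copyB : List Char → List Char
  | [] => []
  | c :: rest => if c = '^' then caretB rest else c :: copyB rest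
termination_by cs => cs.length
decreasing_by all_goals (simp only [List.length_cons]; omega)
-- Source B's main loop body, entered with the caret at position i−1 consumed
def caretB : List Char → List Char
  | [] => ['^']                                    -- i == n
  | h :: rest =>
    if h = '^' then '^' :: caretB rest             -- empty part: '^' emitted, continue
    else
      match colorTableB.lookup h with
      | some col =>
        "</span><span style=\"color: ".toList ++ col ++ ";\">".toList ++ copyB rest
      | none =>
        -- Source B: h in _DIGITS and i+2 < n and s[i+1] in _DIGITS and s[i+2] in _DIGITS
        -- (the getD reads are guarded by the length test, as the indexing is in Python)
        if digitsB.contains h && decide (2 ≤ rest.length)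
            && digitsB.contains (rest.getD 0 ' ') && digitsB.contains (rest.getD 1 ' ') then
          -- int(h) for a digit char is code − 48; `i += 3` = skip two more chars
          "</span><span style=\"color: #".toList ++ hexB.getD (h.toNat - 48) []
            ++ hexB.getD ((rest.getD 0 ' ').toNat - 48) []
            ++ hexB.getD ((rest.getD 1 ' ').toNat - 48) []
            ++ ";\">".toList ++ copyB (rest.drop 2)
        else if h = '*' then "</span><span>".toList ++ copyB rest
        else if h = ';' || h = ':' then copyB rest
        else h :: copyB rest                       -- default: h left in place, copy loop emits it
termination_by cs => cs.length
decreasing_by all_goals (simp only [List.length_cons, List.length_drop]; omega)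
end

def hon2html_alt (msg : Option String) : Option String :=
  match msg with
  | none => none
  | some s =>
    some (String.ofList ("<span>".toList
      ++ copyB (PySem.Chars.replace s.toList "\\n".toList "<br>".toList)
      ++ "</span>".toList))

-- ===== PRECONDITION & SPEC =====
def Spec_hon2html (msg : Option String) (out : Option String) : Prop := out = hon2html_alt msg
instance (msg : Option String) (out : Option String) : Decidable (Spec_hon2html msg out) := by unfold Spec_hon2html; infer_instance

-- ===== CLAIM (what is proved, stated in full; the proofs are below) =====
def Claim_equal_hon2html : Prop := ∀ (msg : Option String), Dom_hon2html msg → Spec_hon2html msg (hon2html msg)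

-- ===== LEMMAS AND PROOFS =====

theorem honColorsA_eq_hexB : honColorsA = hexB := rfl

theorem copyB_nil : copyB [] = [] := by rw [copyB]

theorem caretB_nil : caretB [] = ['^'] := by rw [caretB]

-- a structural model of s.split('^')
def mySplit : List Char → List (List Char)
  | [] => [[]]
  | c :: rest =>
    if c = '^' then [] :: mySplit rest
    else
      match mySplit rest with
      | [] => [[c]]
      | p :: ps => (c :: p) :: ps

theorem mySplit_ne_nil (cs : List Char) : mySplit cs ≠ [] := by
  cases cs with
  | nil => simp [mySplit]
  | cons c rest =>
    simp only [mySplit]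
    split
    · simp
    · split <;> simp

theorem modifyHead_id' (l : List (List Char)) : l.modifyHead (fun p => p) = l := by
  cases l <;> simp

theorem go_spec (fuel : Nat) (l cur : List Char) (acc : List (List Char))
    (h : l.length < fuel) :
    PySem.Chars.splitOn.go ['^'] fuel l cur acc
      = acc.reverse ++ (mySplit l).modifyHead (fun p => cur.reverse ++ p) := by
  induction fuel generalizing l cur acc with
  | zero => omega
  | succ f ih =>
    cases l with
    | nil => simp [PySem.Chars.splitOn.go, mySplit]
    | cons c rest =>
      by_cases hc : c = '^'
      · subst hc
        have hpre : (['^'] : List Char).isPrefixOf ('^' :: rest) = true := by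
          simp [List.isPrefixOf]
        rw [PySem.Chars.splitOn.go]
        simp only [hpre, if_pos, List.length_cons, List.length_nil,
          List.drop_succ_cons, List.drop_zero]
        rw [ih rest [] ((List.reverse cur) :: acc) (by simpa using Nat.lt_of_succ_lt_succ h)]
        simp [mySplit, modifyHead_id']
      · have hpre : (['^'] : List Char).isPrefixOf (c :: rest) = false := by
          simp only [List.isPrefixOf, Bool.and_eq_false_iff]
          left
          rw [beq_eq_false_iff_ne]
          exact fun h' => hc h'.symm
        rw [PySem.Chars.splitOn.go]
        simp only [hpre, Bool.false_eq_true, if_false]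
        rw [ih rest (c :: cur) acc (by simpa using Nat.lt_of_succ_lt_succ h)]
        simp only [mySplit, hc, if_false]
        rcases e : mySplit rest with _ | ⟨p, ps⟩
        · exact absurd e (mySplit_ne_nil rest)
        · simp

theorem splitOn_eq_mySplit (cs : List Char) :
    PySem.Chars.splitOn cs ['^'] = mySplit cs := by
  unfold PySem.Chars.splitOn
  rw [go_spec (cs.length + 1) cs [] [] (by omega)]
  simp [modifyHead_id']

-- from a successful table lookup, pieceA's letter branch fires with the same color
theorem pieceA_lookup (h : Char) (col p : List Char)
    (e : colorTableB.lookup h = some col) :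
    pieceA (h :: p) = "</span><span style=\"color: ".toList ++ col ++ ";\">".toList ++ p := by
  by_cases h1 : h = 'w'
  · subst h1
    injection (show some ("white".toList : List Char) = some col from e) with e3
    subst e3; rfl
  by_cases h1 : h = 'W'
  · subst h1
    injection (show some ("white".toList : List Char) = some col from e) with e3
    subst e3; rfl
  by_cases h1 : h = 'r'
  · subst h1
    injection (show some ("#FF4C4C".toList : List Char) = some col from e) with e3
    subst e3; rfl
  by_cases h1 : h = 'R'
  · subst h1
    injection (show some ("#FF4C4C".toList : List Char) = some col from e) with e3
    subst e3; rfl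
  by_cases h1 : h = 'y'
  · subst h1
    injection (show some ("#FFFF19".toList : List Char) = some col from e) with e3
    subst e3; rfl
  by_cases h1 : h = 'Y'
  · subst h1
    injection (show some ("#FFFF19".toList : List Char) = some col from e) with e3
    subst e3; rfl
  by_cases h1 : h = 'g'
  · subst h1
    injection (show some ("#008000".toList : List Char) = some col from e) with e3
    subst e3; rfl
  by_cases h1 : h = 'G'
  · subst h1
    injection (show some ("#008000".toList : List Char) = some col from e) with e3
    subst e3; rfl
  by_cases h1 : h = 'k'
  · subst h1
    injection (show some ("#000000".toList : List Char) = some col from e) with e3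
    subst e3; rfl
  by_cases h1 : h = 'K'
  · subst h1
    injection (show some ("#000000".toList : List Char) = some col from e) with e3
    subst e3; rfl
  by_cases h1 : h = 'c'
  · subst h1
    injection (show some ("#00FFFF".toList : List Char) = some col from e) with e3
    subst e3; rfl
  by_cases h1 : h = 'C'
  · subst h1
    injection (show some ("#00FFFF".toList : List Char) = some col from e) with e3
    subst e3; rfl
  by_cases h1 : h = 'b'
  · subst h1
    injection (show some ("#4C4CFF".toList : List Char) = some col from e) with e3
    subst e3; rfl
  by_cases h1 : h = 'B'
  · subst h1
    injection (show some ("#4C4CFF".toList : List Char) = some col from e) with e3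
    subst e3; rfl
  by_cases h1 : h = 't'
  · subst h1
    injection (show some ("teal".toList : List Char) = some col from e) with e3
    subst e3; rfl
  by_cases h1 : h = 'T'
  · subst h1
    injection (show some ("teal".toList : List Char) = some col from e) with e3
    subst e3; rfl
  by_cases h1 : h = 'o'
  · subst h1
    injection (show some ("orange".toList : List Char) = some col from e) with e3
    subst e3; rfl
  by_cases h1 : h = 'O'
  · subst h1
    injection (show some ("orange".toList : List Char) = some col from e) with e3
    subst e3; rfl
  by_cases h1 : h = 'm'
  · subst h1
    injection (show some ("#FF00FF".toList : List Char) = some col from e) with e3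
    subst e3; rfl
  by_cases h1 : h = 'M'
  · subst h1
    injection (show some ("#FF00FF".toList : List Char) = some col from e) with e3
    subst e3; rfl
  have hn : colorTableB.lookup h = none :=
    List.lookup_eq_none_iff.mpr (by simp_all [colorTableB])
  rw [hn] at e
  exact nomatch e

theorem lookup_none_not_letter (h : Char) (e : colorTableB.lookup h = none) :
    (h = 'w' ∨ h = 'W' ∨ h = 'r' ∨ h = 'R' ∨ h = 'y' ∨ h = 'Y' ∨ h = 'g' ∨ h = 'G' ∨
     h = 'k' ∨ h = 'K' ∨ h = 'c' ∨ h = 'C' ∨ h = 'b' ∨ h = 'B' ∨ h = 't' ∨ h = 'T' ∨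
     h = 'o' ∨ h = 'O' ∨ h = 'm' ∨ h = 'M') → False := by
  intro hl
  rcases hl with h1|h1|h1|h1|h1|h1|h1|h1|h1|h1|h1|h1|h1|h1|h1|h1|h1|h1|h1|h1 <;>
    subst h1 <;>
    exact nomatch (show some (_ : List Char) = (none : Option (List Char)) from e)

-- with lookup failing, pieceA skips the twenty letter branches
theorem pieceA_no_letter (h : Char) (p : List Char)
    (e : colorTableB.lookup h = none) :
    pieceA (h :: p) =
      (match p with
       | c1 :: c2 :: rest2 =>
         if isDigitA h && isDigitA c1 && isDigitA c2 then
           "</span><span style=\"color: #".toList ++ honColorsA.getD (digitValA h) []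
             ++ honColorsA.getD (digitValA c1) [] ++ honColorsA.getD (digitValA c2) []
             ++ ";\">".toList ++ rest2
         else tailA h (c1 :: c2 :: rest2)
       | _ => tailA h p) := by
  have nl : ¬(h = 'w' ∨ h = 'W' ∨ h = 'r' ∨ h = 'R' ∨ h = 'y' ∨ h = 'Y' ∨ h = 'g' ∨ h = 'G' ∨
      h = 'k' ∨ h = 'K' ∨ h = 'c' ∨ h = 'C' ∨ h = 'b' ∨ h = 'B' ∨ h = 't' ∨ h = 'T' ∨
      h = 'o' ∨ h = 'O' ∨ h = 'm' ∨ h = 'M') := lookup_none_not_letter h e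
  push_neg at nl
  obtain ⟨n1, n2, n3, n4, n5, n6, n7, n8, n9, n10, n11, n12, n13, n14, n15, n16, n17, n18, n19, n20⟩ := nl
  simp only [pieceA, decide_eq_false n1, decide_eq_false n2, decide_eq_false n3, decide_eq_false n4, decide_eq_false n5, decide_eq_false n6, decide_eq_false n7, decide_eq_false n8, decide_eq_false n9, decide_eq_false n10, decide_eq_false n11, decide_eq_false n12, decide_eq_false n13, decide_eq_false n14, decide_eq_false n15, decide_eq_false n16, decide_eq_false n17, decide_eq_false n18, decide_eq_false n19, decide_eq_false n20, Bool.or_self, Bool.false_eq_true, if_false]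

theorem tailA_cases (h : Char) (p : List Char) :
    tailA h p = (if h = '*' then "</span><span>".toList ++ p
                 else if h = ';' || h = ':' then p
                 else h :: p) := by
  simp only [tailA]
  split_ifs <;> simp_all

-- joint invariant: scanner ≡ split + pieces
theorem scan_spec (n : Nat) : ∀ cs : List Char, cs.length ≤ n →
    (copyB cs = (mySplit cs).headD []
        ++ (((mySplit cs).drop 1).map pieceA).flatten) ∧
    (caretB cs = ((mySplit cs).map pieceA).flatten) := by
  induction n with
  | zero =>
    intro cs hlen
    have : cs = [] := by cases cs <;> simp_all
    subst this
    constructor <;> simp [copyB_nil, caretB_nil, mySplit, pieceA]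
  | succ n ih =>
    intro cs hlen
    cases cs with
    | nil => constructor <;> simp [copyB_nil, caretB_nil, mySplit, pieceA]
    | cons c rest =>
      have hr := ih rest (by simpa using Nat.le_of_succ_le_succ hlen)
      constructor
      · -- copyB
        by_cases hc : c = '^'
        · subst hc
          rw [copyB, if_pos rfl]
          simp only [mySplit, if_pos rfl, List.headD_cons, List.drop_succ_cons, List.drop_zero]
          simpa using hr.2
        · rw [copyB, if_neg hc]
          simp only [mySplit, if_neg hc]
          rcases e : mySplit rest with _ | ⟨p, ps⟩
          · exact absurd e (mySplit_ne_nil rest)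
          · have h1 := hr.1
            rw [e] at h1
            simp [h1]
      · -- caretB
        by_cases hc : c = '^'
        · subst hc
          rw [caretB, if_pos rfl]
          simp only [mySplit, if_pos rfl, List.map_cons, List.flatten_cons]
          rw [hr.2]
          rfl
        · rw [caretB, if_neg hc]
          simp only [mySplit, if_neg hc]
          rcases e : mySplit rest with _ | ⟨p, ps⟩
          · exact absurd e (mySplit_ne_nil rest)
          · have h1 := hr.1
            rw [e] at h1
            simp only [List.headD_cons, List.drop_succ_cons, List.drop_zero] at h1
            rcases el : colorTableB.lookup c with _ | col
            · -- no color letter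
              simp only [el]
              simp only [List.map_cons, List.flatten_cons]
              rw [pieceA_no_letter c p el]
              cases rest with
              | nil =>
                simp only [mySplit] at e
                cases e
                rw [tailA_cases]
                clear hr ih
                split_ifs <;> simp_all [digitsB]
              | cons d1 rest1 =>
                by_cases hd1 : d1 = '^'
                · subst hd1
                  simp only [mySplit, if_pos rfl] at e
                  cases e
                  rw [tailA_cases]
                  clear hr ih
                  split_ifs <;> simp_all [digitsB]
                · cases rest1 with
                  | nil =>
                    have e' : mySplit [d1] = [[d1]] := by simp [mySplit, hd1]
                    rw [e'] at e
                    cases e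
                    rw [tailA_cases]
                    clear hr ih
                    split_ifs <;> simp_all [digitsB]
                  | cons d2 rest2 =>
                    by_cases hd2 : d2 = '^'
                    · subst hd2
                      have e' : mySplit (d1 :: '^' :: rest2)
                          = (d1 :: []) :: mySplit rest2 := by
                        simp [mySplit, hd1]
                      rw [e'] at e
                      cases e
                      rw [tailA_cases]
                      clear hr ih
                      split_ifs <;> simp_all [digitsB]
                    · rcases eq : mySplit rest2 with _ | ⟨q, qs⟩
                      · exact absurd eq (mySplit_ne_nil rest2)
                      · have e' : mySplit (d1 :: d2 :: rest2) = (d1 :: d2 :: q) :: qs := by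
                          simp [mySplit, hd1, hd2, eq]
                        rw [e'] at e
                        cases e
                        have h2 := (ih rest2 (by simp at hlen; omega)).1
                        rw [eq] at h2
                        simp only [List.headD_cons, List.drop_succ_cons,
                          List.drop_zero] at h2
                        clear hr ih
                        have hg0 : (d1 :: d2 :: rest2).getD 0 ' ' = d1 := rfl
                        have hg1 : (d1 :: d2 :: rest2).getD 1 ' ' = d2 := rfl
                        have hl2 : decide (2 ≤ (d1 :: d2 :: rest2).length) = true := by simp
                        have hcd : ∀ x : Char, digitsB.contains x = isDigitA x :=
                          fun _ => rfl
                        simp only [hg0, hg1, hl2, hcd, Bool.and_true]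
                        by_cases hdig : (isDigitA c && isDigitA d1 && isDigitA d2) = true
                        · rw [if_pos hdig, if_pos hdig]
                          simp [honColorsA_eq_hexB, digitValA, h2]
                        · rw [if_neg hdig, if_neg hdig]
                          rw [tailA_cases]
                          split_ifs <;> simp_all
            · -- color letter
              simp only [el]
              simp only [List.map_cons, List.flatten_cons]
              rw [pieceA_lookup c col p el]
              simp [h1]

-- A's fold over the tail parts is the concatenation of the pieces
theorem foldA (parts : List (List Char)) (init : List Char) :
    parts.foldl (fun acc part => acc ++ pieceA part) init
      = init ++ (parts.map pieceA).flatten := by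
  induction parts generalizing init with
  | nil => simp
  | cons p ps ih => simp [List.foldl_cons, ih, List.append_assoc]

-- ===== VERDICT (by name: the statement is the Claim_ definition above) =====
theorem hon2html_spec : Claim_equal_hon2html := by
  unfold Claim_equal_hon2html
  intro msg _
  unfold Spec_hon2html hon2html hon2html_alt
  cases msg with
  | none => rfl
  | some s =>
    simp only
    rw [show ("^".toList : List Char) = ['^'] from rfl]
    rw [splitOn_eq_mySplit, foldA]
    have := (scan_spec (PySem.Chars.replace s.toList "\\n".toList "<br>".toList).length
      (PySem.Chars.replace s.toList "\\n".toList "<br>".toList) (le_refl _)).1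
    rw [this]
    simp [List.append_assoc]
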